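-- pv_equiv track=rewrite | github.com/HERIUN/kor_ner_spacy_data | 094_convert_to_ner.py | _merge_adjacent
-- ===== SOURCE A (Python) =====
-- def _merge_adjacent(text: str, entities: list) -> list:
--     """같은 라벨의 연속 엔티티 중 사이 갭이 공백만 있으면 하나로 병합.
--
--     추가: LOC + ORG 또는 ORG + LOC 조합도 공백만 있으면 ORG로 병합.
--     (예: '경기도 수원시' LOC + '문화관광과' ORG → '경기도 수원시 문화관광과' ORG)
--     """
--     if len(entities) < 2:
--         return entities
--     sorted_ents = sorted(entities, key=lambda e: e[0])
--     merged = [list(sorted_ents[0])]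
--     for s, e, lbl in sorted_ents[1:]:
--         prev = merged[-1]
--         gap = text[prev[1]:s]
--         if gap.strip() != "":
--             merged.append([s, e, lbl])
--             continue
--         if prev[2] == lbl:
--             merged[-1][1] = e
--         elif prev[2] == "LOC" and lbl == "ORG":
--             merged[-1][1] = e
--             merged[-1][2] = "ORG"
--         else:
--             merged.append([s, e, lbl])
--     return merged
-- ===== SOURCE B (Python) =====
-- def _merge_adjacent(text: str, entities: list) -> list:
--     """Break-point formulation: precompute for each adjacent sorted pair whether
--     it joins (whitespace-only gap and compatible labels), then emit one group
--     per maximal joined run as [first_start, last_end, last_label]."""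
--     if len(entities) < 2:
--         return entities
--     se = sorted(entities, key=lambda e: e[0])
--     joins = [
--         text[p[1]:c[0]].strip() == ""
--         and (p[2] == c[2] or (p[2] == "LOC" and c[2] == "ORG"))
--         for p, c in zip(se, se[1:])
--     ]
--     out = []
--     start = se[0][0]
--     for (p, c), j in zip(zip(se, se[1:]), joins):
--         if not j:
--             out.append([start, p[1], p[2]])
--             start = c[0]
--     last = se[-1]
--     out.append([start, last[1], last[2]])
--     return out
-- ===== Notes on version B (the rewrite author's own statement) =====
-- stated objective: alternative
-- what changed: A builds the output list while reading and mutating its last element as the merge state; B instead precomputes a per-adjacent-pair join flag (whitespace-only gap and equal or LOC->ORG labels) in one pass and then emits one [first_start, last_end, last_label] record per maximal joined run, with only a scalar group-start as state.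
import Mathlib
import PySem

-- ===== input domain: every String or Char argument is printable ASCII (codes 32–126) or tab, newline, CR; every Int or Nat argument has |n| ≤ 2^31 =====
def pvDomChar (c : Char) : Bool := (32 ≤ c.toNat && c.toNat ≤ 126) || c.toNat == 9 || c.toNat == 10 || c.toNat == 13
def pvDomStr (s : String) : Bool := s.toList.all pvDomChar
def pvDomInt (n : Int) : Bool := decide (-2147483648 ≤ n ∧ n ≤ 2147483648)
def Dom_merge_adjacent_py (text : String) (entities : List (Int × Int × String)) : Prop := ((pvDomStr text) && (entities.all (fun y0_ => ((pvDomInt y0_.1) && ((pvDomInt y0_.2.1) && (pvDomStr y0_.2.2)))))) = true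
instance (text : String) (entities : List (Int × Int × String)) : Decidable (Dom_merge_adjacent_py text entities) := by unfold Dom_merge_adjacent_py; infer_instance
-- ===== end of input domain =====

-- B replaces A's list-with-mutated-last-element accumulator by a two-pass
-- break-point formulation (per-pair join flags, then group emission); alternative, not faster.

-- ===== PORT A =====
-- loop body of A; `acc` is Python's `merged` kept in REVERSE (head = merged[-1])
def pvAStep (text : String) (acc : List (Int × Int × String)) (ent : Int × Int × String) :
    List (Int × Int × String) :=
  match acc with
  | [] => [ent]  -- unreachable: merged starts non-empty
  | prev :: tl =>
    let gap := PySem.Str.slice text (some prev.2.1) (some ent.1)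
    if PySem.Str.strip gap ≠ "" then ent :: prev :: tl
    else if prev.2.2 = ent.2.2 then (prev.1, ent.2.1, prev.2.2) :: tl
    else if prev.2.2 = "LOC" ∧ ent.2.2 = "ORG" then (prev.1, ent.2.1, "ORG") :: tl
    else ent :: prev :: tl

def merge_adjacent_py (text : String) (entities : List (Int × Int × String)) :
    List (Int × Int × String) :=
  if entities.length < 2 then entities
  else
    let se := PySem.List.sorted entities (fun e => e.1)
    match se with
    | [] => []  -- unreachable: entities has ≥ 2 elements
    | h :: t => (t.foldl (pvAStep text) [h]).reverse

-- ===== PORT B =====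
-- join flag of an adjacent sorted pair (p, c)
def pvJoin (text : String) (p c : Int × Int × String) : Bool :=
  (PySem.Str.strip (PySem.Str.slice text (some p.2.1) (some c.1)) == "")
    && (p.2.2 == c.2.2 || (p.2.2 == "LOC" && c.2.2 == "ORG"))

-- second pass: emit a finished group at each non-join break; state = (outRev, start)
def pvBStep (st : List (Int × Int × String) × Int)
    (pcj : ((Int × Int × String) × (Int × Int × String)) × Bool) :
    List (Int × Int × String) × Int :=
  if !pcj.2 then ((st.2, pcj.1.1.2.1, pcj.1.1.2.2) :: st.1, pcj.1.2.1) else st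

def merge_adjacent_py_alt (text : String) (entities : List (Int × Int × String)) :
    List (Int × Int × String) :=
  if entities.length < 2 then entities
  else
    let se := PySem.List.sorted entities (fun e => e.1)
    match se with
    | [] => []  -- unreachable: entities has ≥ 2 elements
    | h :: t =>
      let pairs := (h :: t).zip t
      let joins := pairs.map (fun pc => pvJoin text pc.1 pc.2)
      let st := (pairs.zip joins).foldl pvBStep ([], h.1)
      match PySem.List.pyGet? (h :: t) (-1) with
      | none => []  -- unreachable
      | some last => st.1.reverse ++ [(st.2, last.2.1, last.2.2)]

-- ===== PRECONDITION & SPEC =====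
def Spec_merge_adjacent_py (text : String) (entities : List (Int × Int × String)) (out : List (Int × Int × String)) : Prop := out = merge_adjacent_py_alt text entities
instance (text : String) (entities : List (Int × Int × String)) (out : List (Int × Int × String)) : Decidable (Spec_merge_adjacent_py text entities out) := by unfold Spec_merge_adjacent_py; infer_instance

-- ===== CLAIM (what is proved, stated in full; the proofs are below) =====
def Claim_equal_merge_adjacent_py : Prop := ∀ (text : String) (entities : List (Int × Int × String)), Dom_merge_adjacent_py text entities → Spec_merge_adjacent_py text entities (merge_adjacent_py text entities)

-- ===== LEMMAS AND PROOFS =====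

-- common description of the post-sort result: break-point groups;
-- `gs` = pending group start, `p` = last entity already consumed
def pvGroups (text : String) (gs : Int) (p : Int × Int × String) :
    List (Int × Int × String) → List (Int × Int × String)
  | [] => [(gs, p.2.1, p.2.2)]
  | c :: rs =>
    if pvJoin text p c then pvGroups text gs c rs
    else (gs, p.2.1, p.2.2) :: pvGroups text c.1 c rs

-- A's accumulator head is always (group start, last entity's end, last entity's label)
theorem pvA_loop_eq (text : String) :
    ∀ (t : List (Int × Int × String)) (p : Int × Int × String) (gs : Int)
      (accRev : List (Int × Int × String)),
      (t.foldl (pvAStep text) ((gs, p.2.1, p.2.2) :: accRev)).reverse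
        = accRev.reverse ++ pvGroups text gs p t := by
  intro t
  induction t with
  | nil => intro p gs accRev; simp [pvGroups]
  | cons c rs ih =>
    intro p gs accRev
    obtain ⟨c1, c2, c3⟩ := c
    rw [List.foldl_cons]
    by_cases hg : PySem.Str.strip (PySem.Str.slice text (some p.2.1) (some c1)) = ""
    · by_cases hl : p.2.2 = c3
      · have hstep : pvAStep text ((gs, p.2.1, p.2.2) :: accRev) (c1, c2, c3)
            = ((gs, c2, c3) : Int × Int × String) :: accRev := by
          simp [pvAStep, hg, hl]
        have hj : pvJoin text p (c1, c2, c3) = true := by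
          simp [pvJoin, hg, hl]
        rw [hstep]
        have := ih (c1, c2, c3) gs accRev
        simp only at this
        rw [this]
        simp [pvGroups, hj]
      · by_cases hlo : p.2.2 = "LOC" ∧ c3 = "ORG"
        · have hstep : pvAStep text ((gs, p.2.1, p.2.2) :: accRev) (c1, c2, c3)
              = ((gs, c2, c3) : Int × Int × String) :: accRev := by
            simp [pvAStep, hg, hlo]
          have hj : pvJoin text p (c1, c2, c3) = true := by
            simp [pvJoin, hg, hlo.1, hlo.2]
          rw [hstep]
          have := ih (c1, c2, c3) gs accRev
          simp only at this
          rw [this]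
          simp [pvGroups, hj]
        · have hstep : pvAStep text ((gs, p.2.1, p.2.2) :: accRev) (c1, c2, c3)
              = ((c1, c2, c3) : Int × Int × String) :: (gs, p.2.1, p.2.2) :: accRev := by
            simp [pvAStep, hg, hl, hlo]
          have hj : pvJoin text p (c1, c2, c3) = false := by
            simp [pvJoin, hg, hl]
            intro h1 h2
            exact hlo ⟨h1, h2⟩
          rw [hstep]
          have := ih (c1, c2, c3) c1 ((gs, p.2.1, p.2.2) :: accRev)
          simp only at this
          rw [this]
          simp [pvGroups, hj]
    · have hstep : pvAStep text ((gs, p.2.1, p.2.2) :: accRev) (c1, c2, c3)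
          = ((c1, c2, c3) : Int × Int × String) :: (gs, p.2.1, p.2.2) :: accRev := by
        simp [pvAStep, hg]
      have hj : pvJoin text p (c1, c2, c3) = false := by
        simp [pvJoin, hg]
      rw [hstep]
      have := ih (c1, c2, c3) c1 ((gs, p.2.1, p.2.2) :: accRev)
      simp only at this
      rw [this]
      simp [pvGroups, hj]

-- B's two-pass grouping computes the same break-point groups
theorem pvB_loop_eq (text : String) :
    ∀ (t : List (Int × Int × String)) (p : Int × Int × String) (gs : Int)
      (outRev : List (Int × Int × String)),
      (List.foldl pvBStep (outRev, gs)
          (((p :: t).zip t).zip (((p :: t).zip t).map (fun pc => pvJoin text pc.1 pc.2)))).1.reverse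
        ++ [((List.foldl pvBStep (outRev, gs)
          (((p :: t).zip t).zip (((p :: t).zip t).map (fun pc => pvJoin text pc.1 pc.2)))).2,
            (t.getLastD p).2.1, (t.getLastD p).2.2)]
        = outRev.reverse ++ pvGroups text gs p t := by
  intro t
  induction t with
  | nil => intro p gs outRev; simp [pvGroups]
  | cons c rs ih =>
    intro p gs outRev
    simp only [List.zip_cons_cons, List.map_cons, List.foldl_cons, List.getLastD_cons]
    by_cases hj : pvJoin text p c = true
    · have hstep : pvBStep (outRev, gs) ((p, c), pvJoin text p c) = (outRev, gs) := by
        simp [pvBStep, hj]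
      rw [hstep, ih c gs outRev]
      simp [pvGroups, hj]
    · have hstep : pvBStep (outRev, gs) ((p, c), pvJoin text p c)
          = (((gs, p.2.1, p.2.2) : Int × Int × String) :: outRev, c.1) := by
        simp [pvBStep, Bool.eq_false_iff.mpr hj]
      rw [hstep, ih c c.1 ((gs, p.2.1, p.2.2) :: outRev)]
      simp [pvGroups, hj]

-- ===== VERDICT (by name: the statement is the Claim_ definition above) =====
theorem merge_adjacent_py_spec : Claim_equal_merge_adjacent_py := by
  intro text entities _
  unfold Spec_merge_adjacent_py merge_adjacent_py merge_adjacent_py_alt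
  by_cases hlen : entities.length < 2
  · simp [hlen]
  · simp only [if_neg hlen]
    generalize PySem.List.sorted entities (fun e => e.1) = se
    cases se with
    | nil => rfl
    | cons h t =>
      obtain ⟨h1, h2, h3⟩ := h
      simp only [PySem.List.pyGet?_neg_one, List.getLast?_cons]
      have hA := pvA_loop_eq text t (h1, h2, h3) h1 []
      simp only [List.reverse_nil, List.nil_append] at hA
      have hB := pvB_loop_eq text t (h1, h2, h3) h1 []
      simp only [List.reverse_nil, List.nil_append] at hB
      rw [hA, ← hB]
      simp [List.getLastD_eq_getLast?]
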